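-- pv_equiv track=rewrite | github.com/AbcSxyZ/tmpsh | lexer/utils/readgrammar.py | get_atomic_op
-- ===== SOURCE A (Python) =====
-- def containalphanum(key):
-- 	return any([l.isalnum() for l in key])
--
-- def get_atomic_op(rev_gra_keys):
-- 	atomic_op = [k for k in rev_gra_keys if not containalphanum(k)]
-- 	atomic_op.append('\n')
-- 	compose_op = [k for k in atomic_op if "." in k]
-- 	for k in compose_op:
-- 		atomic_op.remove(k)
-- 		atomic_op.extend(k.split('.'))
-- 	return atomic_op
-- ===== SOURCE B (Python) =====
-- def get_atomic_op(rev_gra_keys):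
--     plain = []
--     parts = []
--     for k in rev_gra_keys:
--         if all(not ch.isalnum() for ch in k):
--             if "." in k:
--                 parts += k.split(".")
--             else:
--                 plain.append(k)
--     return plain + ["\n"] + parts
-- ===== Notes on version B (the rewrite author's own statement) =====
-- stated objective: simpler
-- what changed: One partitioning pass that routes each non-alphanumeric key either to the result list or (split on '.') to a trailing parts list, replacing A's second filter pass plus a loop of list.remove scans and extends.
import Mathlib
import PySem

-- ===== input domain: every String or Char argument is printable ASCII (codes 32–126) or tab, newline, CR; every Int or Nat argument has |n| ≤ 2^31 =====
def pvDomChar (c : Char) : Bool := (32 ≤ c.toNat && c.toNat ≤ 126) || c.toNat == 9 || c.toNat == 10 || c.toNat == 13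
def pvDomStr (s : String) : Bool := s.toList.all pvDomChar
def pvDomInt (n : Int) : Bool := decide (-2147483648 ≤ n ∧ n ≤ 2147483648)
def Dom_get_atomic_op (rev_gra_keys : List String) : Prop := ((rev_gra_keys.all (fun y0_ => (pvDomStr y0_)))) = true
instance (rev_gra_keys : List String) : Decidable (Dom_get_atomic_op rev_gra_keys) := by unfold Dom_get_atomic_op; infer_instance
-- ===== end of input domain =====

-- B replaces A's second filter pass + loop of list.remove scans by one partitioning pass; equivalence proved on all inputs.


-- ===== PORT A =====
def containalphanum (key : String) : Bool :=
  (key.toList.map (fun l => PySem.Chars.isalnum l)).any id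

def get_atomic_op (rev_gra_keys : List String) : List String :=
  let atomic_op := rev_gra_keys.filter (fun k => !containalphanum k)
  let atomic_op := atomic_op ++ ["\n"]
  let compose_op := atomic_op.filter (fun k => PySem.Str.isIn "." k)
  -- remove? is some (k is in the list), split? is some ("." ≠ ""): the getD defaults are unreachable
  compose_op.foldl
    (fun acc k => ((PySem.List.remove? acc k).getD acc) ++ ((PySem.Str.split? k ".").getD []))
    atomic_op

-- ===== PORT B =====
def get_atomic_op_alt (rev_gra_keys : List String) : List String :=
  let pd := rev_gra_keys.foldl
    (fun (pd : List String × List String) k =>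
      if k.toList.all (fun ch => !PySem.Chars.isalnum ch) then
        if PySem.Str.isIn "." k then (pd.1, pd.2 ++ (PySem.Str.split? k ".").getD [])
        else (pd.1 ++ [k], pd.2)
      else pd)
    ([], [])
  pd.1 ++ ["\n"] ++ pd.2

-- ===== PRECONDITION & SPEC =====
def Spec_get_atomic_op (rev_gra_keys : List String) (out : List String) : Prop := out = get_atomic_op_alt rev_gra_keys
instance (rev_gra_keys : List String) (out : List String) : Decidable (Spec_get_atomic_op rev_gra_keys out) := by unfold Spec_get_atomic_op; infer_instance

-- ===== CLAIM (what is proved, stated in full; the proofs are below) =====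
def Claim_equal_get_atomic_op : Prop := ∀ (rev_gra_keys : List String), Dom_get_atomic_op rev_gra_keys → Spec_get_atomic_op rev_gra_keys (get_atomic_op rev_gra_keys)

-- ===== LEMMAS AND PROOFS =====

-- erasing the head of the filter from the list drops it from the filter
theorem filter_erase_of_filter_cons (p : String → Bool) :
    ∀ (L : List String) (k : String) (C : List String),
      L.filter p = k :: C → (L.erase k).filter p = C := by
  intro L
  induction L with
  | nil => intro k C h; simp at h
  | cons x xs ih =>
    intro k C h
    by_cases hx : p x = true
    · simp [List.filter_cons, hx] at h
      obtain ⟨rfl, rfl⟩ := h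
      simp [List.erase_cons]
    · have hxk : x ≠ k := by
        intro hxy
        have hpk : p k = true := by
          have : k ∈ List.filter p (x :: xs) := by rw [h]; exact List.mem_cons_self
          exact List.of_mem_filter this
        rw [hxy] at hx; exact hx hpk
      simp [List.filter_cons, hx] at h
      simp [List.erase_cons, hxk, List.filter_cons, hx]
      exact ih k C h

-- erasing an element satisfying p does not change the ¬p-filter
theorem filter_not_erase (p : String → Bool) (k : String) (hpk : p k = true) :
    ∀ (L : List String), (L.erase k).filter (fun x => !p x) = L.filter (fun x => !p x) := by
  intro L
  induction L with
  | nil => simp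
  | cons x xs ih =>
    by_cases hxk : x = k
    · subst hxk
      simp [List.erase_cons, List.filter_cons, hpk]
    · simp [hxk, List.filter_cons]
      by_cases hx : p x = true <;> simp [hx, ih]

-- A's remove/extend loop over the dotted elements, characterised
theorem foldA (p : String → Bool) (f : String → List String) :
    ∀ (C L T : List String), L.filter p = C →
      C.foldl (fun acc k => ((PySem.List.remove? acc k).getD acc) ++ f k) (L ++ T)
        = L.filter (fun x => !p x) ++ T ++ C.flatMap f := by
  intro C
  induction C with
  | nil =>
    intro L T h
    have : ∀ x ∈ L, ¬ p x = true := by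
      intro x hx hp
      have : x ∈ L.filter p := List.mem_filter.mpr ⟨hx, hp⟩
      rw [h] at this; simp at this
    have hfe : L.filter (fun x => !p x) = L := by
      apply List.filter_eq_self.mpr
      intro a ha; simp [this a ha]
    simp [hfe]
  | cons k C' ih =>
    intro L T h
    have hkmemf : k ∈ L.filter p := by rw [h]; exact List.mem_cons_self
    have hk : k ∈ L := List.mem_of_mem_filter hkmemf
    have hpk : p k = true := List.of_mem_filter hkmemf
    have hrem : PySem.List.remove? (L ++ T) k = some ((L ++ T).erase k) :=
      PySem.List.remove?_eq_some_erase (L ++ T) k (List.mem_append_left T hk)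
    have herase : (L ++ T).erase k = L.erase k ++ T := List.erase_append_left T hk
    have hC' : (L.erase k).filter p = C' := filter_erase_of_filter_cons p L k C' h
    calc (k :: C').foldl (fun acc k => ((PySem.List.remove? acc k).getD acc) ++ f k) (L ++ T)
        = C'.foldl (fun acc k => ((PySem.List.remove? acc k).getD acc) ++ f k)
            (L.erase k ++ (T ++ f k)) := by
          simp [List.foldl_cons, hrem, herase, List.append_assoc]
      _ = (L.erase k).filter (fun x => !p x) ++ (T ++ f k) ++ C'.flatMap f := ih _ _ hC'
      _ = L.filter (fun x => !p x) ++ T ++ (k :: C').flatMap f := by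
          rw [filter_not_erase p k hpk]
          simp [List.append_assoc]

-- B's partitioning pass, characterised
theorem foldB (cond dot : String → Bool) (f : String → List String) :
    ∀ (l P D : List String),
      l.foldl
        (fun (pd : List String × List String) k =>
          if cond k then
            if dot k then (pd.1, pd.2 ++ f k) else (pd.1 ++ [k], pd.2)
          else pd)
        (P, D)
      = (P ++ l.filter (fun k => cond k && !dot k),
         D ++ (l.filter (fun k => cond k && dot k)).flatMap f) := by
  intro l
  induction l with
  | nil => intro P D; simp
  | cons x xs ih =>
    intro P D
    by_cases hc : cond x = true
    · by_cases hd : dot x = true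
      · simp [List.foldl_cons, hc, hd, ih, List.append_assoc]
      · simp [List.foldl_cons, hc, hd, ih, List.append_assoc]
    · simp [List.foldl_cons, hc, ih]

-- A's and B's "no alphanumeric character" tests agree
theorem cond_eq (k : String) :
    (!containalphanum k) = k.toList.all (fun ch => !PySem.Chars.isalnum ch) := by
  rw [List.all_eq_not_any_not]
  simp [containalphanum, List.any_map]

theorem dot_newline : PySem.Chars.isIn ['.'] ['\n'] = false := by decide

-- foldA with an empty tail
theorem foldA' (p : String → Bool) (f : String → List String) (L : List String) :
    (L.filter p).foldl (fun acc k => ((PySem.List.remove? acc k).getD acc) ++ f k) L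
      = L.filter (fun x => !p x) ++ (L.filter p).flatMap f := by
  have h := foldA p f (L.filter p) L [] rfl
  simpa using h

-- A's result in closed form
theorem A_eq (rev : List String) :
    get_atomic_op rev
      = (rev.filter (fun k => !containalphanum k)).filter (fun k => !PySem.Str.isIn "." k)
          ++ ["\n"]
          ++ ((rev.filter (fun k => !containalphanum k)).filter (fun k => PySem.Str.isIn "." k)).flatMap
              (fun k => (PySem.Str.split? k ".").getD []) := by
  show (((rev.filter (fun k => !containalphanum k) ++ ["\n"]).filter (fun k => PySem.Str.isIn "." k)).foldl
      (fun acc k => ((PySem.List.remove? acc k).getD acc) ++ ((PySem.Str.split? k ".").getD []))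
      (rev.filter (fun k => !containalphanum k) ++ ["\n"])) = _
  rw [foldA' (fun k => PySem.Str.isIn "." k) (fun k => (PySem.Str.split? k ".").getD [])]
  simp [List.filter_append, dot_newline, List.append_assoc]

-- B's result in closed form
theorem B_eq (rev : List String) :
    get_atomic_op_alt rev
      = rev.filter (fun k => (k.toList.all (fun ch => !PySem.Chars.isalnum ch)) && !PySem.Str.isIn "." k)
          ++ ["\n"]
          ++ (rev.filter (fun k => (k.toList.all (fun ch => !PySem.Chars.isalnum ch)) && PySem.Str.isIn "." k)).flatMap
              (fun k => (PySem.Str.split? k ".").getD []) := by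
  unfold get_atomic_op_alt
  rw [foldB (fun k => k.toList.all (fun ch => !PySem.Chars.isalnum ch)) (fun k => PySem.Str.isIn "." k)
      (fun k => (PySem.Str.split? k ".").getD []) rev [] []]
  simp

-- ===== VERDICT (by name: the statement is the Claim_ definition above) =====
theorem get_atomic_op_spec : Claim_equal_get_atomic_op := by
  intro rev _
  unfold Spec_get_atomic_op
  rw [A_eq, B_eq, List.filter_filter, List.filter_filter]
  have hc : ∀ q : String → Bool,
      rev.filter (fun a => q a && !containalphanum a)
        = rev.filter (fun k => (k.toList.all (fun ch => !PySem.Chars.isalnum ch)) && q k) := by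
    intro q
    apply List.filter_congr
    intro x _
    rw [← cond_eq x, Bool.and_comm]
  rw [hc (fun k => !PySem.Str.isIn "." k), hc (fun k => PySem.Str.isIn "." k)]
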